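-- pv_equiv track=rewrite | github.com/angelovang/Soft_Uni_problems_solutions | Fundamental_05_2022/Fundamental_exerc/Text_procesing/Resheniq.py | search_func
-- ===== SOURCE A (Python) =====
-- def count_symbols(side, symbol):
--     current_count = 0
--     total_count = []
--     for i in range(len(side)):
--         if symbol == side[i]:
--             current_count += 1
--             if i == len(side) - 1:
--                 total_count.append(current_count)
--         else:
--             total_count.append(current_count)
--             current_count = 0
--     return max(total_count)
--
-- def search_func(data, symbols):
--     first_side, second_side = data[:10], data[10:]
--     for symbol in symbols:
--         if symbol * 6 in first_side and symbol * 6 in second_side: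
--             counter = min((count_symbols(first_side, symbol)), count_symbols(second_side, symbol))
--             return f'ticket "{data}" - {counter}{symbol}'
--     else:
--         return f'ticket "{data}" - no match'
-- ===== SOURCE B (Python) =====
-- def longest_run(side, symbol):
--     # largest k such that k consecutive copies of symbol occur in side
--     # (the caller guarantees symbol * 6 occurs in side, so k = 6 qualifies)
--     return max(k for k in range(6, len(side) + 1) if symbol * k in side)
--
-- def search_func(data, symbols):
--     first_side, second_side = data[:10], data[10:]
--     hit = next((s for s in symbols if s * 6 in first_side and s * 6 in second_side), None)
--     if hit is None:
--         return f'ticket "{data}" - no match'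
--     counter = min(longest_run(first_side, hit), longest_run(second_side, hit))
--     return f'ticket "{data}" - {counter}{hit}'
-- ===== Notes on version B (the rewrite author's own statement) =====
-- stated objective: alternative
-- what changed: The longest-run helper becomes 'the largest k with symbol*k a substring of the half' (pattern-containment search over k instead of A's index-by-index run-counting state machine with an accumulator list), and the for/else symbol loop becomes a first-match next() over a generator.
-- outside the precondition, e.g. on search_func('aaaaaaaaaaaa', ['']): A returns 'ticket "aaaaaaaaaaaa" - 0', B raises ValueError
import Mathlib
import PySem

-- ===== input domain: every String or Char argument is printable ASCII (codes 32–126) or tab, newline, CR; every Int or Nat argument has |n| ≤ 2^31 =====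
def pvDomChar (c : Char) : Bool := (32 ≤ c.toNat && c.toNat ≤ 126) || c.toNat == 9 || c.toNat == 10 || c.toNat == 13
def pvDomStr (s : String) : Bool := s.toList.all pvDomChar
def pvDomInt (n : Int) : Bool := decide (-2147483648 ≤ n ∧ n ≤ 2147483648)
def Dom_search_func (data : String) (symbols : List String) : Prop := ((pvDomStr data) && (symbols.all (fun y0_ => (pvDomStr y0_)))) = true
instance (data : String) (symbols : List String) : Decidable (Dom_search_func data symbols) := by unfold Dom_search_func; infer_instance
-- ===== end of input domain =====

-- B replaces A's index-by-index run-counting state machine by "the largest k with symbol*k a substring",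
-- and the for/else symbol loop by a first-match search; same return value on Pre_ (no empty-string symbol).

-- ===== PORT A =====
-- count_symbols: strings handled via their char lists (Python string equality = char-list equality).
-- One loop iteration of count_symbols (i runs over range(len(side))).
def stepA (side symbol : List Char) (st : Int × List Int) (i : Int) : Int × List Int :=
  if symbol = [PySem.List.pyGetD side i ' '] then       -- side[i]; i ∈ range(len(side)) so never out of range
    if i = PySem.List.len side - 1 then (st.1 + 1, st.2 ++ [st.1 + 1]) else (st.1 + 1, st.2)
  else (0, st.2 ++ [st.1])

-- count_symbols(side, symbol); none = the ValueError of max([]) (only reachable for side = '')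
def countSymbolsC (side symbol : List Char) : Option Int :=
  PySem.List.max?
    (((PySem.List.pyRange 0 (PySem.List.len side) 1).foldl (stepA side symbol) (0, [])).2)
    (fun y => y)

-- the for symbol in symbols: … / else: loop of search_func
def searchLoopA (data : String) (first second : List Char) : List String → String
  | [] => "ticket \"" ++ data ++ "\" - no match"
  | symbol :: rest =>
    if PySem.Chars.isIn (PySem.List.pyRepeat symbol.toList 6) first
        && PySem.Chars.isIn (PySem.List.pyRepeat symbol.toList 6) second then
      match countSymbolsC first symbol.toList, countSymbolsC second symbol.toList with
      | some c1, some c2 => "ticket \"" ++ data ++ "\" - " ++ PySem.Int.toStr (min c1 c2) ++ symbol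
      | _, _ => ""      -- Python raises ValueError here (max of empty list); outside Pre_
    else searchLoopA data first second rest

def search_func (data : String) (symbols : List String) : String :=
  searchLoopA data
    (PySem.List.slice data.toList none (some 10))       -- data[:10]
    (PySem.List.slice data.toList (some 10) none)       -- data[10:]
    symbols

-- ===== PORT B =====
-- longest_run(side, symbol): max over k in range(6, len(side)+1) with symbol*k in side; none = ValueError of max(())
def longestRunC (side symbol : List Char) : Option Int :=
  PySem.List.max?
    ((PySem.List.pyRange 6 (PySem.List.len side + 1) 1).filter
      (fun k => PySem.Chars.isIn (PySem.List.pyRepeat symbol k) side))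
    (fun y => y)

def search_func_alt (data : String) (symbols : List String) : String :=
  let first := PySem.List.slice data.toList none (some 10)
  let second := PySem.List.slice data.toList (some 10) none
  match symbols.find? (fun s => PySem.Chars.isIn (PySem.List.pyRepeat s.toList 6) first
      && PySem.Chars.isIn (PySem.List.pyRepeat s.toList 6) second) with
  | none => "ticket \"" ++ data ++ "\" - no match"
  | some hit =>
    match longestRunC first hit.toList, longestRunC second hit.toList with
    | some c1, some c2 => "ticket \"" ++ data ++ "\" - " ++ PySem.Int.toStr (min c1 c2) ++ hit
    | _, _ => ""        -- Python raises ValueError here; outside Pre_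

-- ===== PRECONDITION & SPEC =====
-- Pre_ excludes symbol lists containing the empty string: there A raises ValueError (data of ≤ 10 chars)
-- or returns an accidental count of 0 for the empty symbol, while B's substring-maximum raises ValueError.
def Pre_search_func (data : String) (symbols : List String) : Prop := "" ∉ symbols
instance (data : String) (symbols : List String) : Decidable (Pre_search_func data symbols) := by unfold Pre_search_func; infer_instance

def pvWitness_search_func : String × List String := ("aaaaaabbbbaaaaaaacbb", ["b", "a"])

def Spec_search_func (data : String) (symbols : List String) (out : String) : Prop := out = search_func_alt data symbols
instance (data : String) (symbols : List String) (out : String) : Decidable (Spec_search_func data symbols out) := by unfold Spec_search_func; infer_instance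

-- ===== CLAIM (what is proved, stated in full; the proofs are below) =====
def Claim_equal_search_func : Prop := ∀ (data : String) (symbols : List String), Dom_search_func data symbols → Pre_search_func data symbols → Spec_search_func data symbols (search_func data symbols)

-- ===== LEMMAS AND PROOFS =====

-- length of the leading run of c, and of the longest run of c
def leadRun (c : Char) : List Char → Nat
  | [] => 0
  | a :: t => if a = c then leadRun c t + 1 else 0

def maxRun (c : Char) : List Char → Nat
  | [] => 0
  | a :: t => if a = c then max (maxRun c t) (leadRun c t + 1) else maxRun c t

theorem leadRun_le_maxRun (c : Char) (s : List Char) : leadRun c s ≤ maxRun c s := by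
  induction s with
  | nil => simp [leadRun, maxRun]
  | cons a t ih => by_cases h : a = c <;> simp [leadRun, maxRun, h]

theorem replicate_prefix_iff (c : Char) (s : List Char) (k : Nat) :
    List.replicate k c <+: s ↔ k ≤ leadRun c s := by
  induction s generalizing k with
  | nil =>
    cases k with
    | zero => simp [leadRun]
    | succ k => simp [List.replicate_succ, leadRun]
  | cons a t ih =>
    cases k with
    | zero => simp
    | succ k =>
      rw [List.replicate_succ, List.cons_prefix_cons]
      by_cases h : a = c
      · simp [leadRun, h, ih]
      · simp [leadRun, h, ih, eq_comm (a := c)]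

theorem replicate_infix_iff (c : Char) (s : List Char) (k : Nat) :
    List.replicate k c <:+: s ↔ k ≤ maxRun c s := by
  induction s with
  | nil =>
    cases k with
    | zero => simp [maxRun]
    | succ k => simp [List.replicate_succ, maxRun]
  | cons a t ih =>
    rw [List.infix_cons_iff, replicate_prefix_iff, ih]
    have hlm := leadRun_le_maxRun c t
    by_cases h : a = c <;> simp [leadRun, maxRun, h] <;> omega

theorem maxRun_le_length (c : Char) (s : List Char) : maxRun c s ≤ s.length := by
  have h := (replicate_infix_iff c s (maxRun c s)).mpr le_rfl
  have := h.length_le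
  simpa using this

-- first-match maximum with identity key, pinned by membership + upper bound
theorem max?_id_unique (l : List Int) (m : Int) (hm : m ∈ l) (hall : ∀ y ∈ l, y ≤ m) :
    PySem.List.max? l (fun y => y) = some m := by
  cases h : PySem.List.max? l (fun y => y) with
  | none => rw [PySem.List.max?_eq_none_iff] at h; subst h; simp at hm
  | some m' =>
    have h1 : m' ∈ l := PySem.List.max?_mem h
    have h2 := PySem.List.max?_isMax h m hm
    have h3 := hall m' h1
    simp at h2
    rw [le_antisymm h3 h2]

-- loopSpec: count_symbols' loop on the remaining suffix of side
def loopSpec (c : Char) : List Char → Int → List Int → Int × List Int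
  | [], cur, tot => (cur, tot)
  | x :: t, cur, tot =>
    if x = c then loopSpec c t (cur + 1) (if t = [] then tot ++ [cur + 1] else tot)
    else loopSpec c t 0 (tot ++ [cur])

-- the run values count_symbols appends while scanning the (nonempty) suffix
def runsOf (c : Char) : List Char → Int → List Int
  | [], _ => []
  | [x], cur => [if x = c then cur + 1 else cur]
  | x :: y :: t, cur => if x = c then runsOf c (y :: t) (cur + 1) else cur :: runsOf c (y :: t) 0

theorem leadRun_cons (c x : Char) (t : List Char) :
    leadRun c (x :: t) = if x = c then leadRun c t + 1 else 0 := rfl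

theorem maxRun_cons (c x : Char) (t : List Char) :
    maxRun c (x :: t) = if x = c then max (maxRun c t) (leadRun c t + 1) else maxRun c t := rfl

theorem runsOf_single (c x : Char) (cur : Int) :
    runsOf c [x] cur = [if x = c then cur + 1 else cur] := rfl

theorem runsOf_cons_cons (c x y : Char) (t : List Char) (cur : Int) :
    runsOf c (x :: y :: t) cur
      = if x = c then runsOf c (y :: t) (cur + 1) else cur :: runsOf c (y :: t) 0 := rfl

theorem loopSpec_cons (c x : Char) (t : List Char) (cur : Int) (tot : List Int) :
    loopSpec c (x :: t) cur tot
      = if x = c then loopSpec c t (cur + 1) (if t = [] then tot ++ [cur + 1] else tot)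
        else loopSpec c t 0 (tot ++ [cur]) := rfl

theorem foldA_eq_loopSpec (c : Char) (s : List Char) :
    ∀ (k j : Nat), s.length - j = k → j ≤ s.length → ∀ (cur : Int) (tot : List Int),
      (PySem.List.pyRange (j : Int) (PySem.List.len s) 1).foldl (stepA s [c]) (cur, tot)
        = loopSpec c (s.drop j) cur tot := by
  intro k
  induction k with
  | zero =>
    intro j hk hle cur tot
    have hj : j = s.length := by omega
    subst hj
    rw [PySem.List.pyRange_one_eq_nil (by simp)]
    simp [loopSpec]
  | succ k ihk =>
    intro j hk hle cur tot
    have hlt : j < s.length := by omega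
    rw [PySem.List.pyRange_one_cons (by simp; exact_mod_cast hlt), List.foldl_cons]
    have hget : PySem.List.pyGetD s (j : Int) ' ' = s[j] := by
      rw [PySem.List.pyGetD_natCast]
      exact List.getD_eq_getElem s ' ' hlt
    have hstep : stepA s [c] (cur, tot) (j : Int)
        = if c = s[j] then
            (if j + 1 = s.length then (cur + 1, tot ++ [cur + 1]) else (cur + 1, tot))
          else (0, tot ++ [cur]) := by
      simp only [stepA, hget, List.cons.injEq, and_true, PySem.List.len_eq]
      by_cases hl : j + 1 = s.length
      · rw [if_pos (show ((j : Int) = (s.length : Int) - 1) from by omega), if_pos hl]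
      · rw [if_neg (show ¬((j : Int) = (s.length : Int) - 1) from by omega), if_neg hl]
    rw [hstep, List.drop_eq_getElem_cons hlt, loopSpec_cons,
      show ((j : Int) + 1) = ((j + 1 : Nat) : Int) from by push_cast; ring]
    by_cases hc : c = s[j]
    · rw [if_pos hc, if_pos hc.symm]
      by_cases hl : j + 1 = s.length
      · rw [if_pos hl, if_pos (List.drop_eq_nil_of_le (by omega)),
          ihk (j + 1) (by omega) (by omega)]
      · rw [if_neg hl,
          if_neg (show ¬(s.drop (j + 1) = []) from by
            intro h
            have := List.drop_eq_nil_iff.mp h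
            omega),
          ihk (j + 1) (by omega) (by omega)]
    · rw [if_neg hc, if_neg (fun h => hc h.symm), ihk (j + 1) (by omega) (by omega)]

theorem loopSpec_snd (c : Char) :
    ∀ (s : List Char), s ≠ [] → ∀ (cur : Int) (tot : List Int),
      (loopSpec c s cur tot).2 = tot ++ runsOf c s cur := by
  intro s
  induction s with
  | nil => simp
  | cons x t ih =>
    intro _ cur tot
    cases t with
    | nil =>
      rw [loopSpec_cons, runsOf_single]
      by_cases h : x = c <;> simp [h, loopSpec]
    | cons y t' =>
      rw [loopSpec_cons, runsOf_cons_cons]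
      by_cases h : x = c
      · simp only [h, if_true]
        simp only [List.cons_ne_nil, if_false]
        exact ih (by simp) (cur + 1) tot
      · simp only [h, if_false]
        rw [ih (by simp) 0 (tot ++ [cur]), List.append_assoc]
        rfl

theorem runsOf_bound (c : Char) :
    ∀ (s : List Char), s ≠ [] → ∀ (cur : Int), 0 ≤ cur →
      ∀ y ∈ runsOf c s cur, y ≤ max (cur + (leadRun c s : Int)) (maxRun c s : Int) := by
  intro s
  induction s with
  | nil => simp
  | cons x t ih =>
    intro _ cur hcur y hy
    rw [leadRun_cons, maxRun_cons]
    cases t with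
    | nil =>
      rw [runsOf_single] at hy
      by_cases h : x = c <;> simp [h, leadRun, maxRun] at hy ⊢ <;> omega
    | cons z t' =>
      rw [runsOf_cons_cons] at hy
      have hlm := leadRun_le_maxRun c (z :: t')
      by_cases h : x = c
      · simp [h] at hy ⊢
        have := ih (by simp) (cur + 1) (by omega) y hy
        push_cast at this ⊢
        omega
      · simp [h] at hy ⊢
        rcases hy with hy | hy
        · omega
        · have := ih (by simp) 0 (by omega) y hy
          push_cast at this
          omega

theorem runsOf_mem (c : Char) :
    ∀ (s : List Char), s ≠ [] → ∀ (cur : Int), 0 ≤ cur →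
      max (cur + (leadRun c s : Int)) (maxRun c s : Int) ∈ runsOf c s cur := by
  intro s
  induction s with
  | nil => simp
  | cons x t ih =>
    intro _ cur hcur
    rw [leadRun_cons, maxRun_cons]
    cases t with
    | nil =>
      rw [runsOf_single]
      by_cases h : x = c <;> simp [h, leadRun, maxRun] <;> omega
    | cons z t' =>
      rw [runsOf_cons_cons]
      have hlm := leadRun_le_maxRun c (z :: t')
      by_cases h : x = c
      · simp only [if_pos h]
        have hmem := ih (by simp) (cur + 1) (by omega)
        have heq : max (cur + ((leadRun c (z :: t') + 1 : Nat) : Int))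
            ((max (maxRun c (z :: t')) (leadRun c (z :: t') + 1) : Nat) : Int)
            = max ((cur + 1) + ((leadRun c (z :: t') : Nat) : Int))
              ((maxRun c (z :: t') : Nat) : Int) := by
          push_cast; omega
        rw [heq]
        exact hmem
      · simp only [if_neg h]
        have hmem := ih (by simp) 0 (by omega)
        by_cases hc : ((maxRun c (z :: t') : Nat) : Int) ≤ cur
        · have heq : max (cur + ((0 : Nat) : Int)) ((maxRun c (z :: t') : Nat) : Int) = cur := by
            push_cast; omega
          rw [heq]
          exact List.mem_cons_self
        · have heq : max (cur + ((0 : Nat) : Int)) ((maxRun c (z :: t') : Nat) : Int)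
              = ((maxRun c (z :: t') : Nat) : Int) := by push_cast; omega
          rw [heq]
          have heq2 : max ((0 : Int) + ((leadRun c (z :: t') : Nat) : Int))
              ((maxRun c (z :: t') : Nat) : Int) = ((maxRun c (z :: t') : Nat) : Int) := by
            omega
          rw [heq2] at hmem
          exact List.mem_cons_of_mem _ hmem

theorem countSymbolsC_eq (c : Char) (s : List Char) (hs : s ≠ []) :
    countSymbolsC s [c] = some (maxRun c s : Int) := by
  unfold countSymbolsC
  have h := foldA_eq_loopSpec c s s.length 0 (by omega) (by omega) 0 []
  rw [Nat.cast_zero, List.drop_zero] at h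
  rw [h, loopSpec_snd c s hs 0 [], List.nil_append]
  have hlm := leadRun_le_maxRun c s
  apply max?_id_unique
  · have hmem := runsOf_mem c s hs 0 le_rfl
    have heq : max ((0 : Int) + (leadRun c s : Int)) ((maxRun c s : Nat) : Int)
        = ((maxRun c s : Nat) : Int) := by omega
    rw [heq] at hmem
    exact hmem
  · intro y hy
    have := runsOf_bound c s hs 0 le_rfl y hy
    push_cast at this
    omega

theorem longestRunC_eq (c : Char) (s : List Char) (h6 : List.replicate 6 c <:+: s) :
    longestRunC s [c] = some (maxRun c s : Int) := by
  unfold longestRunC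
  have h6' : 6 ≤ maxRun c s := (replicate_infix_iff c s 6).mp h6
  have hMl : maxRun c s ≤ s.length := maxRun_le_length c s
  apply max?_id_unique
  · rw [List.mem_filter]
    refine ⟨?_, ?_⟩
    · rw [PySem.List.len_eq]
      exact PySem.List.mem_pyRange_one.mpr ⟨by omega, by omega⟩
    · rw [PySem.List.pyRepeat_singleton, Int.toNat_natCast]
      exact (PySem.Chars.isIn_iff_infix _ _).mpr ((replicate_infix_iff c s (maxRun c s)).mpr le_rfl)
  · intro y hy
    rw [List.mem_filter] at hy
    obtain ⟨hy1, hy2⟩ := hy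
    have h6y : 6 ≤ y := (PySem.List.mem_pyRange_one.mp hy1).1
    rw [PySem.List.pyRepeat_singleton] at hy2
    have := (replicate_infix_iff c s y.toNat).mp ((PySem.Chars.isIn_iff_infix _ _).mp hy2)
    omega

-- the symbol loop of A agrees with the first-match search of B
theorem loop_eq_find (data : String) (first second : List Char) (hf : first.length ≤ 10) :
    ∀ symbols : List String, "" ∉ symbols →
      searchLoopA data first second symbols
        = match symbols.find? (fun s => PySem.Chars.isIn (PySem.List.pyRepeat s.toList 6) first
              && PySem.Chars.isIn (PySem.List.pyRepeat s.toList 6) second) with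
          | none => "ticket \"" ++ data ++ "\" - no match"
          | some hit =>
            match longestRunC first hit.toList, longestRunC second hit.toList with
            | some c1, some c2 =>
              "ticket \"" ++ data ++ "\" - " ++ PySem.Int.toStr (min c1 c2) ++ hit
            | _, _ => "" := by
  intro symbols
  induction symbols with
  | nil => intro _; rfl
  | cons sym rest ih =>
    intro hpre
    rw [List.find?_cons]
    cases hg : (PySem.Chars.isIn (PySem.List.pyRepeat sym.toList 6) first
        && PySem.Chars.isIn (PySem.List.pyRepeat sym.toList 6) second) with
    | false =>
      rw [show searchLoopA data first second (sym :: rest)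
          = searchLoopA data first second rest from by
        simp only [searchLoopA]; rw [if_neg (by rw [hg]; simp)]]
      exact ih (fun h => hpre (List.mem_cons_of_mem _ h))
    | true =>
      simp only [Bool.and_eq_true] at hg
      obtain ⟨hg1, hg2⟩ := hg
      have hinf1 := (PySem.Chars.isIn_iff_infix _ _).mp hg1
      have hinf2 := (PySem.Chars.isIn_iff_infix _ _).mp hg2
      have hne : sym.toList ≠ [] := fun h =>
        hpre (by rw [← String.toList_eq_nil_iff.mp h]; exact List.mem_cons_self)
      have hlen6 : (PySem.List.pyRepeat sym.toList 6).length = 6 * sym.toList.length := by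
        simp [PySem.List.pyRepeat]; ring
      have hlen : sym.toList.length = 1 := by
        have h1 := hinf1.length_le
        rw [hlen6] at h1
        have : 1 ≤ sym.toList.length := List.length_pos_iff.mpr hne
        omega
      obtain ⟨c, hc⟩ := List.length_eq_one_iff.mp hlen
      rw [hc] at hinf1 hinf2
      rw [PySem.List.pyRepeat_singleton] at hinf1 hinf2
      rw [show ((6 : Int)).toNat = 6 from rfl] at hinf1 hinf2
      have hfne : first ≠ [] := by
        intro h
        have := hinf1.length_le
        simp [h] at this
      have hsne : second ≠ [] := by
        intro h
        have := hinf2.length_le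
        simp [h] at this
      rw [show searchLoopA data first second (sym :: rest)
          = (match countSymbolsC first sym.toList, countSymbolsC second sym.toList with
             | some c1, some c2 =>
               "ticket \"" ++ data ++ "\" - " ++ PySem.Int.toStr (min c1 c2) ++ sym
             | _, _ => "") from by
        simp only [searchLoopA]
        rw [if_pos (by rw [hg1, hg2]; simp)]]
      simp only [hc, countSymbolsC_eq c first hfne, countSymbolsC_eq c second hsne,
        longestRunC_eq c first hinf1, longestRunC_eq c second hinf2]

-- ===== VERDICT (by name: the statement is the Claim_ definition above) =====
theorem search_func_spec : Claim_equal_search_func := by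
  intro data symbols _ hpre
  show search_func data symbols = search_func_alt data symbols
  unfold search_func search_func_alt
  have hf : (PySem.List.slice data.toList none (some 10)).length ≤ 10 := by
    rw [PySem.List.slice_to data.toList (by norm_num)]
    have := List.length_take_le (10 : Int).toNat data.toList
    omega
  exact loop_eq_find data _ _ hf symbols hpre
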